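-- pv_equiv track=rewrite | github.com/KarolKrzekotowski/A-Game-Theoretic-Method-of-Fair-Resource-Allocation-for-Cloud-Computing-Services | generator_a.py | generate_matrices
-- ===== SOURCE A (Python) =====
-- from itertools import combinations
--
-- def generate_matrices(rows, constraints):
--     if not rows or not constraints:
--         return []
--
--     def generate_helper(row_index, current_matrix):
--         if row_index == len(rows):
--             result.append(current_matrix.copy())
--             return
--
--         for combination in combinations(range(len(current_matrix[row_index])), constraints[row_index]):
--             next_matrix = [row[:] for row in current_matrix]
--             for index in combination:
--                 next_matrix[row_index][index] = 1
--             generate_helper(row_index + 1, next_matrix)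
--
--     result = []
--     generate_helper(0, [[0] * len(rows[0]) for _ in range(len(rows))])
--     return result
-- ===== SOURCE B (Python) =====
-- from itertools import combinations, product
--
-- def generate_matrices(rows, constraints):
--     if not rows or not constraints:
--         return []
--     width = len(rows[0])
--     row_options = []
--     for i in range(len(rows)):
--         opts = []
--         for comb in combinations(range(width), constraints[i]):
--             row = [0] * width
--             for j in comb:
--                 row[j] = 1
--             opts.append(row)
--         row_options.append(opts)
--     return [[list(r) for r in choice] for choice in product(*row_options)]
-- ===== Notes on version B (the rewrite author's own statement) =====
-- stated objective: alternative
-- what changed: Replaces the recursive helper that copies the whole partially-filled matrix at every tree node with a flat Cartesian-product assembly: per-row candidate rows are precomputed once from combinations, then itertools.product stitches them into matrices.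
-- outside the precondition, e.g. on generate_matrices([[0], [0]], [5, -1]): A returns [], B raises ValueError; on generate_matrices([[0], [0]], [5]): A returns [], B raises IndexError
import Mathlib
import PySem

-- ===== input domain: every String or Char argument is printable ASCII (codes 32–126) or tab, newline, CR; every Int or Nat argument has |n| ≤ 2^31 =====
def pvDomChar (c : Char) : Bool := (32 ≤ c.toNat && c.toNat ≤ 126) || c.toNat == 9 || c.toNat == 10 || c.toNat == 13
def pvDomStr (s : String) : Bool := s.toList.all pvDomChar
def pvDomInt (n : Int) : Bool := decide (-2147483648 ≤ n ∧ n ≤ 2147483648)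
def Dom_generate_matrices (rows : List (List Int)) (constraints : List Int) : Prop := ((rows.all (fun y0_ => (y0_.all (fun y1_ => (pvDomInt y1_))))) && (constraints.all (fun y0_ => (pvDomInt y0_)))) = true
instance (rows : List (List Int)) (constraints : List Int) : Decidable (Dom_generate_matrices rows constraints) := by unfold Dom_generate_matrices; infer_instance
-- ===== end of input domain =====

-- B replaces A's recursive per-node whole-matrix copying with per-row option lists
-- combined by a Cartesian product (alternative decomposition, no speed claim).

-- shared helper: itertools.combinations(range-like ascending list, k), in Python's
-- lexicographic yield order (exact for this use)
def combL (xs : List Nat) (k : Nat) : List (List Nat) :=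
  match xs, k with
  | _, 0 => [[]]
  | [], _+1 => []
  | x :: xs, k+1 => (combL xs k).map (fun c => x :: c) ++ combL xs (k+1)

-- ===== PORT A =====
-- next_matrix = [row[:] for row in cur]; for index in combination: next_matrix[i][index] = 1
def setRowOnes (m : List (List Int)) (i : Nat) (combo : List Nat) : List (List Int) :=
  m.modify i (fun row => combo.foldl (fun r j => r.set j 1) row)

-- generate_helper: recursion over remaining rows; result accumulation (result.append
-- at the leaves) becomes flatMap over the recursive calls, in the same order.
-- len(current_matrix[row_index]) is always len(rows[0]) = w.
def genHelperA (constraints : List Int) (w : Nat) : Nat → Nat → List (List Int) → List (List (List Int))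
  | 0, _, cur => [cur]
  | n+1, idx, cur =>
      (combL (List.range w) (constraints.getD idx 0).toNat).flatMap
        (fun combo => genHelperA constraints w n (idx+1) (setRowOnes cur idx combo))

def generate_matrices (rows : List (List Int)) (constraints : List Int) : List (List (List Int)) :=
  if rows = [] ∨ constraints = [] then []
  else
    genHelperA constraints (rows.headD []).length rows.length 0
      ((List.range rows.length).map (fun _ => List.replicate (rows.headD []).length (0 : Int)))

-- ===== PORT B =====
-- row = [0]*width; for j in comb: row[j] = 1
def rowOf (w : Nat) (combo : List Nat) : List Int :=
  combo.foldl (fun r j => r.set j 1) (List.replicate w (0 : Int))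

-- itertools.product: first factor slowest, last fastest
def cartProd {α : Type} : List (List α) → List (List α)
  | [] => [[]]
  | xs :: rest => xs.flatMap (fun x => (cartProd rest).map (fun c => x :: c))

def generate_matrices_alt (rows : List (List Int)) (constraints : List Int) : List (List (List Int)) :=
  if rows = [] ∨ constraints = [] then []
  else
    let w := (rows.headD []).length
    let row_options := (List.range rows.length).map
        (fun i => (combL (List.range w) ((constraints.getD i 0).toNat)).map (rowOf w))
    -- list(r) copies values; identity on the value level
    (cartProd row_options).map (fun choice => choice.map (fun r => r))

-- ===== PRECONDITION & SPEC =====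
-- Pre_ excludes inputs where Python A raises (constraints list too short, or a
-- negative constraint, reached by the recursion: IndexError/ValueError), and also
-- inputs with such a bad constraints entry that A's recursion happens to die before
-- reaching (A returns []); on those B itself raises (ValueError/IndexError) because it
-- precomputes options for every row.
def Pre_generate_matrices (rows : List (List Int)) (constraints : List Int) : Prop :=
  rows = [] ∨ constraints = [] ∨
    (rows.length ≤ constraints.length ∧ ∀ c ∈ constraints.take rows.length, 0 ≤ c)
instance (rows : List (List Int)) (constraints : List Int) : Decidable (Pre_generate_matrices rows constraints) := by unfold Pre_generate_matrices; infer_instance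

def pvWitness_generate_matrices : List (List Int) × List Int := ([[0, 0], [0, 0]], [1, 2])

def Spec_generate_matrices (rows : List (List Int)) (constraints : List Int) (out : List (List (List Int))) : Prop := out = generate_matrices_alt rows constraints
instance (rows : List (List Int)) (constraints : List Int) (out : List (List (List Int))) : Decidable (Spec_generate_matrices rows constraints out) := by unfold Spec_generate_matrices; infer_instance

-- ===== CLAIM (what is proved, stated in full; the proofs are below) =====
def Claim_equal_generate_matrices : Prop := ∀ (rows : List (List Int)) (constraints : List Int), Dom_generate_matrices rows constraints → Pre_generate_matrices rows constraints → Spec_generate_matrices rows constraints (generate_matrices rows constraints)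

-- ===== LEMMAS AND PROOFS =====

lemma modify_eq_set_of_get? {α : Type} (m : List α) (i : Nat) (v : α) (f : α → α)
    (h : m[i]? = some v) : m.modify i f = m.set i (f v) := by
  rw [List.modify_eq_set_getElem?, h]; rfl

lemma take_succ_set {α : Type} (m : List α) (i : Nat) (v : α) (h : i < m.length) :
    (m.set i v).take (i+1) = m.take i ++ [v] := by
  induction m generalizing i with
  | nil => simp at h
  | cons a t ih =>
    cases i with
    | zero => simp
    | succ j =>
      simp only [List.set_cons_succ, List.take_succ_cons, List.cons_append]
      rw [ih j (by simpa using h)]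

lemma genHelperA_eq (c : List Int) (w : Nat) (n : Nat) :
    ∀ (idx : Nat) (cur : List (List Int)),
    (∀ k, k < n → cur[idx+k]? = some (List.replicate w (0 : Int))) →
    idx + n = cur.length →
    genHelperA c w n idx cur
      = (cartProd ((List.range n).map
          (fun k => (combL (List.range w) ((c.getD (idx+k) 0).toNat)).map (rowOf w)))).map
          (fun ch => cur.take idx ++ ch) := by
  induction n with
  | zero =>
    intro idx cur _ hlen
    simp [genHelperA, cartProd, List.take_of_length_le (show cur.length ≤ idx by omega)]
  | succ n ih =>
    intro idx cur h hlen
    have hidx : idx < cur.length := by omega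
    have h0 : cur[idx]? = some (List.replicate w (0 : Int)) := by
      simpa using h 0 (Nat.succ_pos n)
    -- rewrite each branch
    have branch : ∀ combo : List Nat,
        genHelperA c w n (idx+1) (setRowOnes cur idx combo)
          = (cartProd ((List.range n).map
              (fun k => (combL (List.range w) ((c.getD (idx+1+k) 0).toNat)).map (rowOf w)))).map
              (fun ch => cur.take idx ++ (rowOf w combo :: ch)) := by
      intro combo
      have hset : setRowOnes cur idx combo = cur.set idx (rowOf w combo) := by
        unfold setRowOnes rowOf
        exact modify_eq_set_of_get? cur idx _ _ h0
      rw [hset]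
      have h1 : ∀ k, k < n → (cur.set idx (rowOf w combo))[(idx+1)+k]? = some (List.replicate w (0 : Int)) := by
        intro k hk
        rw [List.getElem?_set_ne (by omega), show idx+1+k = idx+(k+1) from by omega]
        exact h (k+1) (by omega)
      have h2 : (idx+1) + n = (cur.set idx (rowOf w combo)).length := by
        simp; omega
      rw [ih (idx+1) _ h1 h2]
      apply List.map_congr_left
      intro ch _
      rw [take_succ_set cur idx _ hidx, List.append_assoc, List.singleton_append]
    -- assemble both sides into one flatMap over the same combination list
    rw [List.range_succ_eq_map]
    simp only [genHelperA, List.map_cons, List.map_map, cartProd, List.flatMap_map,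
      List.map_flatMap]
    congr 1
    funext combo
    rw [branch combo]
    simp only [Function.comp_def]
    congr 2
    apply List.map_congr_left
    intro k _
    have hk : idx + 1 + k = idx + k.succ := by omega
    rw [hk]

-- ===== VERDICT (by name: the statement is the Claim_ definition above) =====
theorem generate_matrices_spec : Claim_equal_generate_matrices := by
  intro rows constraints _ _
  unfold Spec_generate_matrices generate_matrices generate_matrices_alt
  by_cases hc : rows = [] ∨ constraints = []
  · simp [hc]
  · simp only [if_neg hc]
    have hinit : ∀ k, k < rows.length →
        ((List.range rows.length).map
          (fun _ => List.replicate (rows.headD []).length (0:Int)))[0+k]?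
          = some (List.replicate (rows.headD []).length (0:Int)) := by
      intro k hk
      simp [hk]
    have hlen : 0 + rows.length
        = ((List.range rows.length).map
            (fun _ => List.replicate (rows.headD []).length (0:Int))).length := by simp
    rw [genHelperA_eq constraints (rows.headD []).length rows.length 0 _ hinit hlen]
    simp [List.map_id']
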